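-- pv_equiv track=rewrite | github.com/Osint-tracker/impact-atlas | impact-atlas/war_tracker_v2/scripts2/refiner_fast.py | is_relevant_loose
-- ===== SOURCE A (Python) =====
-- MIN_TEXT_LENGTH = 50         # Lowered to include shorter GDELT (was 150)
--
-- MANDATORY_ANCHORS_STRICT = [
--     "ukrain", "russia", "moscow", "kremlin", "kyiv", "kiev", "donetsk", "luhansk",
--     "kharkiv", "kherson", "zaporizhzhia", "crimea", "mariupol", "bakhmut"
-- ]
--
-- MANDATORY_ANCHORS_LOOSE = [
--     "ukrain", "russia", "moscow", "kremlin", "kyiv", "kiev", "donetsk", "luhansk",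
--     "kharkiv", "kherson", "zaporizhzhia", "crimea", "mariupol", "bakhmut", "drone",
--     "missile", "artillery", "tank", "military", "troops", "soldiers", "war", "attack",
--     "strike", "offensive", "defense", "front", "battle", "rocket", "shell", "bomb",
--     "infantry", "brigade", "regiment", "wagner", "azov", "himars", "patriot"
-- ]
--
-- def is_relevant_loose(text, url, source_type):
--     """New relaxed filter with GDELT bypass."""
--     content = ""
--     if isinstance(text, str):
--         content += text.lower()
--     if isinstance(url, str):
--         content += " " + url.lower()
--
--     if not content.strip() or len(content) < MIN_TEXT_LENGTH:
--         return False
--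
--     # GDELT/WEB_NEWS: Use looser filter
--     if source_type in ['GDELT', 'WEB_NEWS']:
--         for anchor in MANDATORY_ANCHORS_LOOSE:
--             if anchor in content:
--                 return True
--         return False
--     else:
--         # Telegram: Keep original strict filter
--         for anchor in MANDATORY_ANCHORS_STRICT:
--             if anchor in content:
--                 return True
--         return False
-- ===== SOURCE B (Python) =====
-- MIN_TEXT_LENGTH = 50
--
-- STRICT_WORDS = ("ukrain russia moscow kremlin kyiv kiev donetsk luhansk "
--                 "kharkiv kherson zaporizhzhia crimea mariupol bakhmut")
--
-- LOOSE_EXTRA = ("drone missile artillery tank military troops soldiers war attack "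
--                "strike offensive defense front battle rocket shell bomb infantry "
--                "brigade regiment wagner azov himars patriot")
--
--
-- def is_relevant_loose(text, url, source_type):
--     """Position-major scan: one left-to-right pass over content, prefix-testing
--     the word set only at offsets whose character can start a word, instead of
--     one full substring search per anchor."""
--     parts = []
--     if isinstance(text, str):
--         parts.append(text.lower())
--     if isinstance(url, str):
--         parts.append(" " + url.lower())
--     content = "".join(parts)
--
--     if not content.strip() or len(content) < MIN_TEXT_LENGTH:
--         return False
--
--     words = (STRICT_WORDS + " " + LOOSE_EXTRA
--              if source_type in ('GDELT', 'WEB_NEWS')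
--              else STRICT_WORDS).split()
--     firsts = {w[0] for w in words}
--
--     for i, ch in enumerate(content):
--         if ch in firsts and any(content.startswith(w, i) for w in words):
--             return True
--     return False
-- ===== Notes on version B (the rewrite author's own statement) =====
-- stated objective: alternative
-- what changed: Anchors become one space-separated word string split at call time, and the anchor-major loop of k independent substring searches is replaced by a single position-major pass over content: at each offset the character is tested against a precomputed set of first letters and only then the words are prefix-tested there.
import Mathlib
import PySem

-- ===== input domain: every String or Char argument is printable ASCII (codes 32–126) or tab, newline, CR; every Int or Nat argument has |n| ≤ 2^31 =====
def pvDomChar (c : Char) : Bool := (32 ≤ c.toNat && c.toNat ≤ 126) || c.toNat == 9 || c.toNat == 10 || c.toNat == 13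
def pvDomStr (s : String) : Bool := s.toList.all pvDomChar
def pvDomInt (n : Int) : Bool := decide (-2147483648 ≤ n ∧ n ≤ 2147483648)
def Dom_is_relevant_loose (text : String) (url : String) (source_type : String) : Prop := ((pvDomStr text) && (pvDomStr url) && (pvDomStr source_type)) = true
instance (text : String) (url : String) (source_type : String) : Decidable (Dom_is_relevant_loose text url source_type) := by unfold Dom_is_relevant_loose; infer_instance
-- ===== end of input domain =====

-- B replaces the anchor-major loop (one substring search per anchor) by a single
-- position-major pass over content, guarded by a set of first letters, with the anchor
-- lists held as one word string split at call time (objective: alternative).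

-- ===== PORT A =====
def anchorsStrict : List (List Char) :=
  ["ukrain".toList, "russia".toList, "moscow".toList, "kremlin".toList, "kyiv".toList,
   "kiev".toList, "donetsk".toList, "luhansk".toList, "kharkiv".toList, "kherson".toList,
   "zaporizhzhia".toList, "crimea".toList, "mariupol".toList, "bakhmut".toList]

def anchorsLoose : List (List Char) :=
  anchorsStrict ++
  ["drone".toList, "missile".toList, "artillery".toList, "tank".toList, "military".toList,
   "troops".toList, "soldiers".toList, "war".toList, "attack".toList, "strike".toList,
   "offensive".toList, "defense".toList, "front".toList, "battle".toList, "rocket".toList,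
   "shell".toList, "bomb".toList, "infantry".toList, "brigade".toList, "regiment".toList,
   "wagner".toList, "azov".toList, "himars".toList, "patriot".toList]

-- A's `for anchor in …: if anchor in content: return True` loop
def anchorLoopA : List (List Char) → List Char → Bool
  | [], _ => false
  | a :: rest, content =>
    if PySem.Chars.isIn a content then true else anchorLoopA rest content

-- content is built as a List Char (text.lower() + " " + url.lower()); both arguments
-- are str in the Lean signature, so both isinstance branches are taken.
def is_relevant_loose (text : String) (url : String) (source_type : String) : Bool :=
  let content := PySem.Chars.lower text.toList ++ ' ' :: PySem.Chars.lower url.toList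
  if PySem.Chars.strip content = [] ∨ content.length < 50 then false
  else if source_type = "GDELT" ∨ source_type = "WEB_NEWS" then
    anchorLoopA anchorsLoose content
  else
    anchorLoopA anchorsStrict content

-- ===== PORT B =====
-- B's anchor constants: one space-separated word string each
def strictWords : String :=
  "ukrain russia moscow kremlin kyiv kiev donetsk luhansk kharkiv kherson zaporizhzhia crimea mariupol bakhmut"

def looseExtra : String :=
  "drone missile artillery tank military troops soldiers war attack strike offensive defense front battle rocket shell bomb infantry brigade regiment wagner azov himars patriot"

-- B's position loop: `for i, ch in enumerate(content): if ch in firsts and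
-- any(content.startswith(w, i) for w in words)`; content.startswith(w, i) is
-- exact as Chars.startswith on the suffix starting at i (here c :: rest).
def posScan (words : List (List Char)) (firsts : PySem.Set Char) : List Char → Bool
  | [] => false
  | c :: rest =>
    if PySem.Set.contains firsts c && words.any (fun w => PySem.Chars.startswith (c :: rest) w)
    then true else posScan words firsts rest

def is_relevant_loose_alt (text : String) (url : String) (source_type : String) : Bool :=
  let parts := [PySem.Chars.lower text.toList, ' ' :: PySem.Chars.lower url.toList]
  let content := parts.flatten
  if PySem.Chars.strip content = [] ∨ content.length < 50 then false
  else
    let words := PySem.Chars.split₀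
      (if source_type = "GDELT" ∨ source_type = "WEB_NEWS" then
        strictWords.toList ++ ' ' :: looseExtra.toList
      else strictWords.toList)
    -- {w[0] for w in words}: every word of the split literals is nonempty, so w[0] = w.head?
    let firsts : PySem.Set Char := PySem.Set.ofList (words.filterMap List.head?)
    posScan words firsts content

-- ===== PRECONDITION & SPEC =====
def Spec_is_relevant_loose (text : String) (url : String) (source_type : String) (out : Bool) : Prop := out = is_relevant_loose_alt text url source_type
instance (text : String) (url : String) (source_type : String) (out : Bool) : Decidable (Spec_is_relevant_loose text url source_type out) := by unfold Spec_is_relevant_loose; infer_instance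

-- ===== CLAIM (what is proved, stated in full; the proofs are below) =====
def Claim_equal_is_relevant_loose : Prop := ∀ (text : String) (url : String) (source_type : String), Dom_is_relevant_loose text url source_type → Spec_is_relevant_loose text url source_type (is_relevant_loose text url source_type)

-- ===== LEMMAS AND PROOFS =====

theorem anchorLoopA_eq_true_iff (L : List (List Char)) (content : List Char) :
    anchorLoopA L content = true ↔ ∃ a ∈ L, a <:+: content := by
  induction L with
  | nil => simp [anchorLoopA]
  | cons a rest ih =>
    simp only [anchorLoopA]
    by_cases h : PySem.Chars.isIn a content
    · simp only [h, if_true, List.mem_cons, true_iff]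
      exact ⟨a, Or.inl rfl, (PySem.Chars.isIn_iff_infix a content).mp h⟩
    · have h' : ¬ a <:+: content := fun hi => h ((PySem.Chars.isIn_iff_infix a content).mpr hi)
      simp [h, ih, h']

theorem posScan_eq_true_iff (L : List (List Char)) (firsts : PySem.Set Char)
    (hne : ∀ w ∈ L, w ≠ [])
    (hf : ∀ w ∈ L, ∀ x t, w = x :: t → PySem.Set.contains firsts x = true)
    (s : List Char) : posScan L firsts s = true ↔ ∃ a ∈ L, a <:+: s := by
  induction s with
  | nil =>
    simp only [posScan]
    constructor
    · intro h; exact absurd h (by simp)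
    · rintro ⟨a, ha, hinf⟩
      exact absurd (List.eq_nil_of_infix_nil hinf) (hne a ha)
  | cons c rest ih =>
    simp only [posScan]
    by_cases h : (PySem.Set.contains firsts c &&
        L.any (fun w => PySem.Chars.startswith (c :: rest) w)) = true
    · simp only [h, if_true, true_iff]
      rcases List.any_eq_true.mp (Bool.and_elim_right h) with ⟨a, ha, hsw⟩
      exact ⟨a, ha, ((PySem.Chars.startswith_iff (c :: rest) a).mp hsw).isInfix⟩
    · rw [if_neg (by simpa using h), ih]
      constructor
      · rintro ⟨a, ha, hinf⟩; exact ⟨a, ha, hinf.trans (List.suffix_cons c rest).isInfix⟩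
      · rintro ⟨a, ha, hinf⟩
        rcases List.infix_cons_iff.mp hinf with hpre | hinf'
        · exfalso
          apply h
          rcases a with _ | ⟨x, t⟩
          · exact absurd rfl (hne [] ha)
          · have hx : x = c := by rcases hpre with ⟨u, hu⟩; simpa using congrArg List.head? hu
            refine Bool.and_intro (hx ▸ hf _ ha x t rfl) ?_
            exact List.any_eq_true.mpr ⟨x :: t, ha, (PySem.Chars.startswith_iff _ _).mpr hpre⟩
        · exact ⟨a, ha, hinf'⟩

theorem firsts_complete (L : List (List Char)) (w : List Char) (hw : w ∈ L)
    (x : Char) (t : List Char) (hx : w = x :: t) :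
    PySem.Set.contains (PySem.Set.ofList (L.filterMap List.head?)) x = true := by
  refine (PySem.Set.contains_iff _ _).mpr ((PySem.Set.mem_ofList _ _).mpr ?_)
  exact List.mem_filterMap.mpr ⟨w, hw, by simp [hx]⟩

theorem anchorsStrict_ne_nil : ∀ w ∈ anchorsStrict, w ≠ [] := by decide
theorem anchorsLoose_ne_nil : ∀ w ∈ anchorsLoose, w ≠ [] := by decide

set_option maxRecDepth 40000 in
theorem split_strict : PySem.Chars.split₀ strictWords.toList = anchorsStrict := by decide

set_option maxRecDepth 40000 in
theorem split_loose :
    PySem.Chars.split₀ (strictWords.toList ++ ' ' :: looseExtra.toList) = anchorsLoose := by decide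

theorem loops_agree (L : List (List Char)) (hne : ∀ w ∈ L, w ≠ []) (content : List Char) :
    anchorLoopA L content =
      posScan L (PySem.Set.ofList (L.filterMap List.head?)) content := by
  have h := (anchorLoopA_eq_true_iff L content).trans
    (posScan_eq_true_iff L _ hne (firsts_complete L) content).symm
  cases ha : anchorLoopA L content <;>
    cases hb : posScan L (PySem.Set.ofList (L.filterMap List.head?)) content <;> simp_all

-- ===== VERDICT (by name: the statement is the Claim_ definition above) =====
theorem is_relevant_loose_spec : Claim_equal_is_relevant_loose := by
  unfold Claim_equal_is_relevant_loose
  intro text url source_type _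
  unfold Spec_is_relevant_loose is_relevant_loose is_relevant_loose_alt
  have hc : ([PySem.Chars.lower text.toList, ' ' :: PySem.Chars.lower url.toList] : List (List Char)).flatten
      = PySem.Chars.lower text.toList ++ ' ' :: PySem.Chars.lower url.toList := by simp
  simp only [hc]
  split_ifs with h1 h2
  · rfl
  · rw [split_loose, loops_agree _ anchorsLoose_ne_nil]
  · rw [split_strict, loops_agree _ anchorsStrict_ne_nil]
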